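-- pv_equiv track=rewrite | github.com/BharathHU/python-programming | __pycache__/sec min eleinAray.py | findSecMin
-- ===== SOURCE A (Python) =====
-- def findSecMin(arr):
--     minEle,minEleInd=2**32,-1
--     secMinEle,secMinEleInd=2**32,-1
--     for i in range(0,len(arr)):
--         if minEle>arr[i]:
--             secMinEle,secMinEleInd=minEle,minEleInd
--             minEle,minEleInd=arr[i],i
--         elif minEle !=arr[i] and secMinEle > arr[i]:
--             secMinEle,secMinEleInd = arr[i],i
--     return [minEle,minEleInd,secMinEle,secMinEleInd]
-- ===== SOURCE B (Python) =====
-- def findSecMin(arr):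
--     minEle, minEleInd = 2**32, -1
--     for i, x in enumerate(arr):
--         if x < minEle:
--             minEle, minEleInd = x, i
--     secMinEle, secMinEleInd = 2**32, -1
--     for i, x in enumerate(arr):
--         if x != minEle and x < secMinEle:
--             secMinEle, secMinEleInd = x, i
--     return [minEle, minEleInd, secMinEle, secMinEleInd]
-- ===== Notes on version B (the rewrite author's own statement) =====
-- stated objective: alternative
-- what changed: A's single interleaved scan (where the second-min is inherited from min updates) is split into two independent passes: one finding the min with its first index, then one finding the smallest element different from the min with its first index.
import Mathlib
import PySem

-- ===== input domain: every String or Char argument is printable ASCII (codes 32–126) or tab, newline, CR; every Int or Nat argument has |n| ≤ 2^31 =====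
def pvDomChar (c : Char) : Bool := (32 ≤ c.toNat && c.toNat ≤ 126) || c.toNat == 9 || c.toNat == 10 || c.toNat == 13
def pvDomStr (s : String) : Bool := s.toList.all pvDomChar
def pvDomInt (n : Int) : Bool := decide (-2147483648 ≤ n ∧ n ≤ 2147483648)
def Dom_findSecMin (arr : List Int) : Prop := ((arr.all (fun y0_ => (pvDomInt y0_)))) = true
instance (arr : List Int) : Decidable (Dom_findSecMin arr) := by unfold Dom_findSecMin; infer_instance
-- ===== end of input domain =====

-- B replaces A's single interleaved scan (second-min inherited from min updates) by two
-- independent passes: first find the min, then scan again for the smallest element ≠ min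
-- (objective: alternative decomposition, same cost).

-- ===== PORT A =====
-- loop body of A's single for-loop (state: minEle, minEleInd, secMinEle, secMinEleInd)
def stepA (x i : Int) : Int × Int × Int × Int → Int × Int × Int × Int
  | (m, mi, s, si) =>
    if m > x then (x, i, m, mi)
    else if m ≠ x ∧ s > x then (m, mi, x, i)
    else (m, mi, s, si)

def loopA : List Int → Int → Int × Int × Int × Int → Int × Int × Int × Int
  | [], _, st => st
  | x :: xs, i, st => loopA xs (i + 1) (stepA x i st)

def findSecMin (arr : List Int) : List Int :=
  let st := loopA arr 0 (2 ^ 32, -1, 2 ^ 32, -1)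
  [st.1, st.2.1, st.2.2.1, st.2.2.2]

-- ===== PORT B =====
-- first pass: min with first-occurrence index
def stepMin (x i : Int) : Int × Int → Int × Int
  | (m, mi) => if x < m then (x, i) else (m, mi)

def minLoop : List Int → Int → Int × Int → Int × Int
  | [], _, st => st
  | x :: xs, i, st => minLoop xs (i + 1) (stepMin x i st)

-- second pass: smallest element different from the min, first-occurrence index
def stepSec (me x i : Int) : Int × Int → Int × Int
  | (s, si) => if x ≠ me ∧ x < s then (x, i) else (s, si)

def secLoop : Int → List Int → Int → Int × Int → Int × Int
  | _, [], _, st => st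
  | me, x :: xs, i, st => secLoop me xs (i + 1) (stepSec me x i st)

def findSecMin_alt (arr : List Int) : List Int :=
  let mp := minLoop arr 0 (2 ^ 32, -1)
  let sp := secLoop mp.1 arr 0 (2 ^ 32, -1)
  [mp.1, mp.2, sp.1, sp.2]

-- ===== PRECONDITION & SPEC =====
def Spec_findSecMin (arr : List Int) (out : List Int) : Prop := out = findSecMin_alt arr
instance (arr : List Int) (out : List Int) : Decidable (Spec_findSecMin arr out) := by unfold Spec_findSecMin; infer_instance

-- ===== CLAIM (what is proved, stated in full; the proofs are below) =====
def Claim_equal_findSecMin : Prop := ∀ (arr : List Int), Dom_findSecMin arr → Spec_findSecMin arr (findSecMin arr)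

-- ===== LEMMAS AND PROOFS =====

theorem loopA_append (p : List Int) (x : Int) : ∀ (i : Int) (st : Int × Int × Int × Int),
    loopA (p ++ [x]) i st = stepA x (i + p.length) (loopA p i st) := by
  induction p with
  | nil => intro i st; simp [loopA]
  | cons y ys ih =>
      intro i st
      simp only [List.cons_append, loopA, ih]
      congr 1
      push_cast [List.length_cons]
      omega

theorem minLoop_append (p : List Int) (x : Int) : ∀ (i : Int) (st : Int × Int),
    minLoop (p ++ [x]) i st = stepMin x (i + p.length) (minLoop p i st) := by
  induction p with
  | nil => intro i st; simp [minLoop]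
  | cons y ys ih =>
      intro i st
      simp only [List.cons_append, minLoop, ih]
      congr 1
      push_cast [List.length_cons]
      omega

theorem secLoop_append (me : Int) (p : List Int) (x : Int) : ∀ (i : Int) (st : Int × Int),
    secLoop me (p ++ [x]) i st = stepSec me x (i + p.length) (secLoop me p i st) := by
  induction p with
  | nil => intro i st; simp [secLoop]
  | cons y ys ih =>
      intro i st
      simp only [List.cons_append, secLoop, ih]
      congr 1
      push_cast [List.length_cons]
      omega

-- if c is strictly below every element, the ≠ c filter never fires and the second pass is a min pass
theorem secLoop_eq_minLoop (c : Int) (p : List Int) (h : ∀ y ∈ p, c < y) :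
    ∀ (i : Int) (st : Int × Int), secLoop c p i st = minLoop p i st := by
  induction p with
  | nil => intro i st; rfl
  | cons y ys ih =>
      intro i st
      have hy : c < y := h y (by simp)
      have : stepSec c y i st = stepMin y i st := by
        obtain ⟨s, si⟩ := st
        simp only [stepSec, stepMin]
        have hne : y ≠ c := ne_of_gt hy
        simp [hne]
      rw [secLoop, minLoop, this, ih (fun z hz => h z (by simp [hz]))]

-- the running minimum bounds every element seen and the initial value
theorem minLoop_le (p : List Int) : ∀ (i m mi : Int),
    (minLoop p i (m, mi)).1 ≤ m ∧ ∀ y ∈ p, (minLoop p i (m, mi)).1 ≤ y := by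
  induction p with
  | nil => intro i m mi; exact ⟨le_refl _, by simp⟩
  | cons x xs ih =>
      intro i m mi
      simp only [minLoop, stepMin]
      by_cases hx : x < m
      · simp only [if_pos hx]
        obtain ⟨h1, h2⟩ := ih (i + 1) x i
        refine ⟨le_of_lt (lt_of_le_of_lt h1 hx), ?_⟩
        intro y hy
        rcases List.mem_cons.mp hy with rfl | hy
        · exact h1
        · exact h2 y hy
      · simp only [if_neg hx]
        obtain ⟨h1, h2⟩ := ih (i + 1) m mi
        refine ⟨h1, ?_⟩
        intro y hy
        rcases List.mem_cons.mp hy with rfl | hy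
        · exact h1.trans (not_lt.mp hx)
        · exact h2 y hy

-- main invariant: after processing a prefix p, A's state is B's two passes over p
theorem loopA_eq (p : List Int) :
    loopA p 0 (2 ^ 32, -1, 2 ^ 32, -1) =
      ((minLoop p 0 (2 ^ 32, -1)).1, (minLoop p 0 (2 ^ 32, -1)).2,
        secLoop (minLoop p 0 (2 ^ 32, -1)).1 p 0 (2 ^ 32, -1)) := by
  induction p using List.reverseRecOn with
  | nil => rfl
  | append_singleton p x ih =>
      obtain ⟨m, mi, hmp⟩ : ∃ a b, minLoop p 0 (2 ^ 32, -1) = (a, b) := ⟨_, _, rfl⟩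
      have hle := minLoop_le p 0 (2 ^ 32) (-1)
      rw [hmp] at hle
      rw [loopA_append, minLoop_append, ih, hmp, secLoop_append]
      by_cases hx : x < m
      · -- new minimum found: A's sec inherits (m, mi); B's second pass wrt x over p ++ [x]
        -- sees only elements > x, so it is a min pass over p and also yields (m, mi)
        have hallp : ∀ y ∈ p, x < y := fun y hy => lt_of_lt_of_le hx (hle.2 y hy)
        simp only [stepA, stepMin, gt_iff_lt, if_pos hx]
        rw [secLoop_eq_minLoop x p hallp, hmp]
        simp [stepSec]
      · -- minimum unchanged: A's elif branch is exactly B's second-pass update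
        obtain ⟨s1, s2, hsp⟩ : ∃ a b, secLoop m p 0 (2 ^ 32, -1) = (a, b) := ⟨_, _, rfl⟩
        simp only [stepA, stepMin, gt_iff_lt, if_neg hx]
        rw [hsp]
        simp only [stepSec]
        split_ifs with h1 h2 h2
        · rfl
        · exact absurd ⟨h1.1.symm, h1.2⟩ h2
        · exact absurd ⟨h2.1.symm, h2.2⟩ h1
        · rfl

-- ===== VERDICT (by name: the statement is the Claim_ definition above) =====
theorem findSecMin_spec : Claim_equal_findSecMin := by
  intro arr _
  show findSecMin arr = findSecMin_alt arr
  simp only [findSecMin, findSecMin_alt, loopA_eq]
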